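-- pv_equiv track=rewrite | github.com/Vineyardcode/voynich_slop | scripts/phase90_crossword_chunk_mi.py | parse_word_into_chunks
-- ===== SOURCE A (Python) =====
-- GALLOWS_TRI = ['cth', 'ckh', 'cph', 'cfh']
--
-- GALLOWS_BI  = ['ch', 'sh', 'th', 'kh', 'ph', 'fh']
--
-- def eva_to_glyphs(word):
--     glyphs = []
--     i = 0
--     w = word.lower()
--     while i < len(w):
--         if i + 2 < len(w) and w[i:i+3] in GALLOWS_TRI:
--             glyphs.append(w[i:i+3]); i += 3
--         elif i + 1 < len(w) and w[i:i+2] in GALLOWS_BI: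
--             glyphs.append(w[i:i+2]); i += 2
--         else:
--             glyphs.append(w[i]); i += 1
--     return glyphs
--
-- SLOT1 = {'ch', 'sh', 'y'}
--
-- SLOT2_RUNS = {'e'}
--
-- SLOT2_SINGLE = {'q', 'a'}
--
-- SLOT3 = {'o'}
--
-- SLOT4_RUNS = {'i'}
--
-- SLOT4_SINGLE = {'d'}
--
-- SLOT5 = {'y', 'p', 'f', 'k', 'l', 'r', 's', 't',
--          'cth', 'ckh', 'cph', 'cfh', 'n', 'm'}
--
-- MAX_CHUNKS = 6
--
-- def parse_one_chunk(glyphs, pos):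
--     start = pos
--     chunk = []
--     if pos < len(glyphs) and glyphs[pos] in SLOT1:
--         chunk.append(glyphs[pos]); pos += 1
--     if pos < len(glyphs):
--         if glyphs[pos] in SLOT2_RUNS:
--             count = 0
--             while pos < len(glyphs) and glyphs[pos] in SLOT2_RUNS and count < 3:
--                 chunk.append(glyphs[pos]); pos += 1; count += 1
--         elif glyphs[pos] in SLOT2_SINGLE:
--             chunk.append(glyphs[pos]); pos += 1
--     if pos < len(glyphs) and glyphs[pos] in SLOT3:
--         chunk.append(glyphs[pos]); pos += 1
--     if pos < len(glyphs):
--         if glyphs[pos] in SLOT4_RUNS: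
--             count = 0
--             while pos < len(glyphs) and glyphs[pos] in SLOT4_RUNS and count < 3:
--                 chunk.append(glyphs[pos]); pos += 1; count += 1
--         elif glyphs[pos] in SLOT4_SINGLE:
--             chunk.append(glyphs[pos]); pos += 1
--     if pos < len(glyphs) and glyphs[pos] in SLOT5:
--         chunk.append(glyphs[pos]); pos += 1
--     if pos == start:
--         return None, pos
--     return chunk, pos
--
-- def parse_word_into_chunks(word_str):
--     glyphs = eva_to_glyphs(word_str)
--     chunks = []
--     unparsed = []
--     pos = 0
--     while pos < len(glyphs) and len(chunks) < MAX_CHUNKS: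
--         chunk, new_pos = parse_one_chunk(glyphs, pos)
--         if chunk is None:
--             unparsed.append(glyphs[pos]); pos += 1
--         else:
--             chunks.append(chunk); pos = new_pos
--     while pos < len(glyphs):
--         unparsed.append(glyphs[pos]); pos += 1
--     return chunks, unparsed, glyphs
-- ===== SOURCE B (Python) =====
-- GALLOWS_TRI = ['cth', 'ckh', 'cph', 'cfh']
--
-- GALLOWS_BI  = ['ch', 'sh', 'th', 'kh', 'ph', 'fh']
--
-- SLOT1 = {'ch', 'sh', 'y'}
--
-- SLOT3 = {'o'}
--
-- SLOT5 = {'y', 'p', 'f', 'k', 'l', 'r', 's', 't',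
--          'cth', 'ckh', 'cph', 'cfh', 'n', 'm'}
--
-- MAX_CHUNKS = 6
--
-- # per-slot match sets for the automaton's scan, and the run glyph of the run slots
-- SLOT_MATCH = {1: SLOT1, 2: {'e', 'q', 'a'}, 3: SLOT3, 4: {'i', 'd'}, 5: SLOT5}
-- RUN_GLYPH = {2: 'e', 4: 'i'}
--
-- # tokenizer: pick the token length first (a truncated slice never equals a
-- # full-length gallows token, so no explicit bounds checks are needed), slice once
-- def _glyphs(w):
--     out = []
--     i = 0
--     while i < len(w):
--         if w[i:i+3] in GALLOWS_TRI:
--             step = 3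
--         elif w[i:i+2] in GALLOWS_BI:
--             step = 2
--         else:
--             step = 1
--         out.append(w[i:i+step])
--         i += step
--     return out
--
-- def _next_slot(g, state, run):
--     # smallest slot that can consume g now; mid-run, the run glyph continues the
--     # run and anything else scans from the next slot
--     if run and g == RUN_GLYPH[state]:
--         return state
--     for t in range(state + 1 if run else state, 6):
--         if g in SLOT_MATCH[t]:
--             return t
--     return None
--
-- def parse_word_into_chunks(word_str):
--     glyphs = _glyphs(word_str.lower())
--     chunks, unparsed = [], []
--     cur, state, run = [], 1, 0      # chunk in progress, next slot, run length
--     i, n = 0, len(glyphs)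
--     while i < n and len(chunks) < MAX_CHUNKS:
--         g = glyphs[i]
--         t = _next_slot(g, state, run)
--         if t is None:
--             if cur:                 # close the chunk, retry g on a fresh one
--                 chunks.append(cur)
--                 cur, state, run = [], 1, 0
--                 continue
--             unparsed.append(g)
--             i += 1
--             continue
--         cur.append(g)
--         i += 1
--         if t in RUN_GLYPH and g == RUN_GLYPH[t]:
--             run = run + 1 if t == state else 1   # a fresh slot starts a fresh run
--             if run == 3:
--                 state, run = t + 1, 0
--             else:
--                 state = t
--         elif t == 5:                # a slot-5 glyph always ends the chunk
--             chunks.append(cur)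
--             cur, state, run = [], 1, 0
--         else:
--             state, run = t + 1, 0
--     if cur:
--         chunks.append(cur)
--     unparsed.extend(glyphs[i:])
--     return chunks, unparsed, glyphs
-- ===== Notes on version B (the rewrite author's own statement) =====
-- stated objective: alternative
-- what changed: A parses each chunk with a dedicated five-stage routine (parse_one_chunk) that re-walks the slot sequence from a start position; B is a single streaming pass over the glyph list driven by an explicit automaton state (next admissible slot + run length): each glyph is consumed by the smallest admissible slot or else closes the current chunk, so chunks are emitted lazily and there is no per-chunk sub-parser, no start/pos sentinel and no inner while loops.
import Mathlib
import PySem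

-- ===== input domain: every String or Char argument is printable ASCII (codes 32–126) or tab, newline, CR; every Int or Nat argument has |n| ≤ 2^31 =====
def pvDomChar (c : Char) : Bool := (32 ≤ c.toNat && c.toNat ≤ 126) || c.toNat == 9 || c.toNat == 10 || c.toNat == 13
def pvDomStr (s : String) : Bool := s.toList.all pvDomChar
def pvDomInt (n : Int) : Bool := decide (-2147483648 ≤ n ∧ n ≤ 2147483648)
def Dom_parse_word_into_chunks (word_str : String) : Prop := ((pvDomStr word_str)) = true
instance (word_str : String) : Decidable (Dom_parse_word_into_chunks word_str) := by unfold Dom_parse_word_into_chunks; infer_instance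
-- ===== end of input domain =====

-- B replaces A's per-chunk five-stage sub-parser by a single streaming pass driven by
-- an explicit automaton state (next admissible slot + run length); objective: alternative.

-- Glyphs are Python strings; we work on List Char and wrap to String at the boundary.
abbrev Gly := List Char

-- glyphs[q] under a q < len guard (Python list indexing, exact on the guarded uses)
def gAt (g : List Gly) (q : Nat) : Gly := g.getD q []

-- ===== PORT A =====
def pvGALLOWS_TRI : List Gly := [['c','t','h'], ['c','k','h'], ['c','p','h'], ['c','f','h']]
def pvGALLOWS_BI : List Gly := [['c','h'], ['s','h'], ['t','h'], ['k','h'], ['p','h'], ['f','h']]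
def pvSLOT1 : List Gly := [['c','h'], ['s','h'], ['y']]
def pvSLOT2_RUNS : List Gly := [['e']]
def pvSLOT2_SINGLE : List Gly := [['q'], ['a']]
def pvSLOT3 : List Gly := [['o']]
def pvSLOT4_RUNS : List Gly := [['i']]
def pvSLOT4_SINGLE : List Gly := [['d']]
def pvSLOT5 : List Gly := [['y'],['p'],['f'],['k'],['l'],['r'],['s'],['t'],
  ['c','t','h'],['c','k','h'],['c','p','h'],['c','f','h'],['n'],['m']]

-- eva_to_glyphs: while loop over index i; w[i:i+3] etc. are (w.drop i).take 3 (slices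
-- with nonnegative in-range bounds, exact)
def evaA (w : List Char) (i : Nat) : List Gly :=
  if _h : i < w.length then
    if i + 2 < w.length ∧ (w.drop i).take 3 ∈ pvGALLOWS_TRI then
      (w.drop i).take 3 :: evaA w (i + 3)
    else if i + 1 < w.length ∧ (w.drop i).take 2 ∈ pvGALLOWS_BI then
      (w.drop i).take 2 :: evaA w (i + 2)
    else
      [w.getD i ' '] :: evaA w (i + 1)
  else []
termination_by w.length - i
decreasing_by
  · exact Nat.sub_lt_sub_left _h (Nat.lt_add_of_pos_right (by decide))
  · exact Nat.sub_lt_sub_left _h (Nat.lt_add_of_pos_right (by decide))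
  · exact Nat.sub_lt_sub_left _h (Nat.lt_add_of_pos_right (by decide))

-- inner 'while … and count < 3' loops of parse_one_chunk
def whileRunA (R : List Gly) (g : List Gly) (pos count : Nat) (chunk : List Gly) : List Gly × Nat :=
  if h : pos < g.length ∧ gAt g pos ∈ R ∧ count < 3 then
    whileRunA R g (pos + 1) (count + 1) (chunk ++ [gAt g pos])
  else (chunk, pos)
termination_by 3 - count
decreasing_by exact Nat.sub_lt_sub_left h.2.2 (Nat.lt_succ_self count)

-- parse_one_chunk: straight-line slot steps s1..s5 over the state (chunk, pos)
def parse_one_chunkA (g : List Gly) (pos : Nat) : Option (List Gly) × Nat :=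
  let start := pos
  let s0 : List Gly × Nat := ([], pos)
  let s1 := if s0.2 < g.length ∧ gAt g s0.2 ∈ pvSLOT1 then (s0.1 ++ [gAt g s0.2], s0.2 + 1) else s0
  let s2 := if s1.2 < g.length then
      if gAt g s1.2 ∈ pvSLOT2_RUNS then whileRunA pvSLOT2_RUNS g s1.2 0 s1.1
      else if gAt g s1.2 ∈ pvSLOT2_SINGLE then (s1.1 ++ [gAt g s1.2], s1.2 + 1) else s1
    else s1
  let s3 := if s2.2 < g.length ∧ gAt g s2.2 ∈ pvSLOT3 then (s2.1 ++ [gAt g s2.2], s2.2 + 1) else s2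
  let s4 := if s3.2 < g.length then
      if gAt g s3.2 ∈ pvSLOT4_RUNS then whileRunA pvSLOT4_RUNS g s3.2 0 s3.1
      else if gAt g s3.2 ∈ pvSLOT4_SINGLE then (s3.1 ++ [gAt g s3.2], s3.2 + 1) else s3
    else s3
  let s5 := if s4.2 < g.length ∧ gAt g s4.2 ∈ pvSLOT5 then (s4.1 ++ [gAt g s4.2], s4.2 + 1) else s4
  if s5.2 = start then (none, s5.2) else (some s5.1, s5.2)

-- main while loop (MAX_CHUNKS = 6); terminates because each step either appends a
-- chunk (at most 6 times) or advances pos by one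
def loopA (g : List Gly) (chunks : List (List Gly)) (unparsed : List Gly) (pos : Nat) :
    List (List Gly) × List Gly × Nat :=
  if h : pos < g.length ∧ chunks.length < 6 then
    let r := parse_one_chunkA g pos
    match r.1 with
    | none => loopA g chunks (unparsed ++ [gAt g pos]) (pos + 1)
    | some c => loopA g (chunks ++ [c]) unparsed r.2
  else (chunks, unparsed, pos)
termination_by (6 - chunks.length, g.length - pos)
decreasing_by
  · exact Prod.Lex.right _ (Nat.sub_lt_sub_left h.1 (Nat.lt_succ_self pos))
  · exact Prod.Lex.left _ _ (by
      rw [List.length_append, List.length_cons, List.length_nil]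
      exact Nat.sub_lt_sub_left h.2 (Nat.lt_succ_self _))

-- trailing 'while pos < len(glyphs)' loop
def tailA (g : List Gly) (pos : Nat) (unparsed : List Gly) : List Gly :=
  if h : pos < g.length then tailA g (pos + 1) (unparsed ++ [gAt g pos]) else unparsed
termination_by g.length - pos
decreasing_by exact Nat.sub_lt_sub_left h (Nat.lt_succ_self pos)

def parse_word_into_chunks (word_str : String) : List (List String) × List String × List String :=
  let w := PySem.Chars.lower word_str.toList
  let glyphs := evaA w 0
  let r := loopA glyphs [] [] 0
  let unparsed := tailA glyphs r.2.2 r.2.1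
  (r.1.map (fun ch => ch.map String.mk), unparsed.map String.mk, glyphs.map String.mk)

-- ===== PORT B =====
-- glyph scanner of Source B: choose the step length first (a truncated slice is never a
-- full-length gallows token), slice once
def evaB (w : List Char) (i : Nat) : List Gly :=
  if _h : i < w.length then
    let step := if (w.drop i).take 3 ∈ pvGALLOWS_TRI then 3
                else if (w.drop i).take 2 ∈ pvGALLOWS_BI then 2 else 1
    (w.drop i).take step :: evaB w (i + step)
  else []
termination_by w.length - i
decreasing_by
  split_ifs <;>
    exact Nat.sub_lt_sub_left _h (Nat.lt_add_of_pos_right (by decide))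

-- SLOT_MATCH[t] of Source B
def slotMatch (t : Nat) : List Gly :=
  match t with
  | 1 => pvSLOT1
  | 2 => [['e'], ['q'], ['a']]
  | 3 => pvSLOT3
  | 4 => [['i'], ['d']]
  | 5 => pvSLOT5
  | _ => []

-- RUN_GLYPH[s] of Source B; only ever queried with s ∈ {2, 4}
def runGlyph (s : Nat) : Gly := match s with | 2 => ['e'] | _ => ['i']

-- _next_slot: run-continuation check, then 'for t in range(lo, 6)' as find? on range'
def nextSlot (gl : Gly) (state run : Nat) : Option Nat :=
  if run ≠ 0 ∧ gl = runGlyph state then some state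
  else
    ((List.range' (if run ≠ 0 then state + 1 else state)
        (6 - (if run ≠ 0 then state + 1 else state))).find?
      (fun t => decide (gl ∈ slotMatch t)))

-- the streaming automaton loop of Source B; state = next admissible slot, run = run length
def loopB (g : List Gly) (chunks : List (List Gly)) (unparsed : List Gly)
    (cur : List Gly) (state run i : Nat) : List (List Gly) × List Gly × List Gly × Nat :=
  if h : i < g.length ∧ chunks.length < 6 then
    let gl := gAt g i
    match nextSlot gl state run with
    | none =>
      if cur ≠ [] then loopB g (chunks ++ [cur]) unparsed [] 1 0 i
      else loopB g chunks (unparsed ++ [gl]) [] 1 0 (i + 1)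
    | some t =>
      if (t = 2 ∨ t = 4) ∧ gl = runGlyph t then
        let r' := if t = state then run + 1 else 1
        if r' = 3 then loopB g chunks unparsed (cur ++ [gl]) (t + 1) 0 (i + 1)
        else loopB g chunks unparsed (cur ++ [gl]) t r' (i + 1)
      else if t = 5 then loopB g (chunks ++ [cur ++ [gl]]) unparsed [] 1 0 (i + 1)
      else loopB g chunks unparsed (cur ++ [gl]) (t + 1) 0 (i + 1)
  else (chunks, unparsed, cur, i)
termination_by (6 - chunks.length, g.length - i)
decreasing_by
  · exact Prod.Lex.left _ _ (by
      rw [List.length_append, List.length_cons, List.length_nil]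
      exact Nat.sub_lt_sub_left h.2 (Nat.lt_succ_self _))
  · exact Prod.Lex.right _ (Nat.sub_lt_sub_left h.1 (Nat.lt_succ_self i))
  · exact Prod.Lex.right _ (Nat.sub_lt_sub_left h.1 (Nat.lt_succ_self i))
  · exact Prod.Lex.right _ (Nat.sub_lt_sub_left h.1 (Nat.lt_succ_self i))
  · exact Prod.Lex.left _ _ (by
      rw [List.length_append, List.length_cons, List.length_nil]
      exact Nat.sub_lt_sub_left h.2 (Nat.lt_succ_self _))
  · exact Prod.Lex.right _ (Nat.sub_lt_sub_left h.1 (Nat.lt_succ_self i))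

def parse_word_into_chunks_alt (word_str : String) : List (List String) × List String × List String :=
  let w := PySem.Chars.lower word_str.toList
  let glyphs := evaB w 0
  let r := loopB glyphs [] [] [] 1 0 0
  let chunks := if r.2.2.1 ≠ [] then r.1 ++ [r.2.2.1] else r.1
  (chunks.map (fun ch => ch.map String.mk),
   (r.2.1 ++ glyphs.drop r.2.2.2).map String.mk, glyphs.map String.mk)

-- ===== PRECONDITION & SPEC =====
def Spec_parse_word_into_chunks (word_str : String) (out : List (List String) × List String × List String) : Prop := out = parse_word_into_chunks_alt word_str
instance (word_str : String) (out : List (List String) × List String × List String) : Decidable (Spec_parse_word_into_chunks word_str out) := by unfold Spec_parse_word_into_chunks; infer_instance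

-- ===== CLAIM (what is proved, stated in full; the proofs are below) =====
def Claim_equal_parse_word_into_chunks : Prop := ∀ (word_str : String), Dom_parse_word_into_chunks word_str → Spec_parse_word_into_chunks word_str (parse_word_into_chunks word_str)

-- ===== LEMMAS AND PROOFS =====

lemma mem_TRI_len {l : Gly} (h : l ∈ pvGALLOWS_TRI) : l.length = 3 := by
  fin_cases h <;> rfl

lemma mem_BI_len {l : Gly} (h : l ∈ pvGALLOWS_BI) : l.length = 2 := by
  fin_cases h <;> rfl

lemma drop_cons {α : Type} {w : List α} {i : Nat} (h : i < w.length) (d : α) :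
    w.drop i = w.getD i d :: w.drop (i + 1) := by
  rw [List.drop_eq_getElem_cons h, List.getD_eq_getElem w d h]

lemma gAt_drop {g : List Gly} {q : Nat} (h : q < g.length) :
    g.drop q = gAt g q :: g.drop (q + 1) := drop_cons h []

lemma eva_eq (w : List Char) : ∀ i, evaA w i = evaB w i := by
  intro i
  induction i using evaA.induct w with
  | case1 i h h3 ih =>
    rw [evaA.eq_def, evaB.eq_def]
    simp only [h, dif_pos, h3.2, if_pos, h3, ite_true]
    exact congrArg _ ih
  | case2 i h h3 h2 ih =>
    rw [evaA.eq_def, evaB.eq_def]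
    have h3' : ¬ (w.drop i).take 3 ∈ pvGALLOWS_TRI := by
      intro hmem
      exact h3 ⟨by have := mem_TRI_len hmem; simp [List.length_take] at this; omega, hmem⟩
    simp only [h, dif_pos, h3', h2.1, h2.2, and_false, and_true, true_and, and_self,
      ite_true, ite_false, if_false, if_true]
    exact congrArg _ ih
  | case3 i h h3 h2 ih =>
    rw [evaA.eq_def, evaB.eq_def]
    have h3' : ¬ (w.drop i).take 3 ∈ pvGALLOWS_TRI := by
      intro hmem
      exact h3 ⟨by have := mem_TRI_len hmem; simp [List.length_take] at this; omega, hmem⟩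
    have h2' : ¬ (w.drop i).take 2 ∈ pvGALLOWS_BI := by
      intro hmem
      exact h2 ⟨by have := mem_BI_len hmem; simp [List.length_take] at this; omega, hmem⟩
    simp only [h, dif_pos, h3', h2', and_false, ite_false, if_false]
    refine congrArg₂ _ ?_ ih
    rw [drop_cons h ' ']
    simp
  | case4 i h =>
    rw [evaA.eq_def, evaB.eq_def]
    simp [h]

-- ---- characterisation of A's parse_one_chunk by per-slot widths ----

-- width consumed by a run of R, budget m
def runW (g : List Gly) (pos : Nat) (R : List Gly) (m : Nat) : Nat :=
  match m with
  | 0 => 0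
  | m + 1 => if pos < g.length ∧ gAt g pos ∈ R then 1 + runW g (pos + 1) R m else 0

-- width consumed by one slot (run set R with budget m, else single set S)
def slotW (g : List Gly) (pos : Nat) (R : List Gly) (m : Nat) (S : List Gly) : Nat :=
  let k := runW g pos R m
  if k = 0 ∧ pos < g.length ∧ gAt g pos ∈ S then 1 else k

-- chunk end from slot s onward
def E5 (g : List Gly) (q : Nat) : Nat := q + slotW g q [] 0 pvSLOT5
def E4 (g : List Gly) (q : Nat) : Nat := E5 g (q + slotW g q pvSLOT4_RUNS 3 pvSLOT4_SINGLE)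
def E3 (g : List Gly) (q : Nat) : Nat := E4 g (q + slotW g q [] 0 pvSLOT3)
def E2 (g : List Gly) (q : Nat) : Nat := E3 g (q + slotW g q pvSLOT2_RUNS 3 pvSLOT2_SINGLE)
def E1 (g : List Gly) (q : Nat) : Nat := E2 g (q + slotW g q [] 0 pvSLOT1)

lemma take_succ_drop {g : List Gly} {q : Nat} (h : q < g.length) (k : Nat) :
    (g.drop q).take (1 + k) = gAt g q :: (g.drop (q + 1)).take k := by
  rw [gAt_drop h, Nat.add_comm 1 k, List.take_succ_cons]

lemma whileRunA_eq (R g : List Gly) :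
    ∀ m pos count chunk, count + m = 3 →
      whileRunA R g pos count chunk =
        (chunk ++ (g.drop pos).take (runW g pos R m), pos + runW g pos R m) := by
  intro m
  induction m with
  | zero =>
    intro pos count chunk hc
    rw [whileRunA]
    rw [dif_neg (by omega : ¬ (pos < g.length ∧ gAt g pos ∈ R ∧ count < 3))]
    simp [runW]
  | succ m ih =>
    intro pos count chunk hc
    rw [whileRunA]
    by_cases hg : pos < g.length ∧ gAt g pos ∈ R
    · rw [dif_pos ⟨hg.1, hg.2, by omega⟩]
      beta_reduce
      rw [ih (pos + 1) (count + 1) _ (by omega)]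
      have hrw : runW g pos R (m + 1) = 1 + runW g (pos + 1) R m := by
        simp only [runW]
        rw [if_pos hg]
      rw [hrw, take_succ_drop hg.1]
      refine Prod.ext ?_ (by omega)
      simp
    · rw [dif_neg (fun hcontra => hg ⟨hcontra.1, hcontra.2.1⟩)]
      have hrw : runW g pos R (m + 1) = 0 := by
        simp only [runW]
        rw [if_neg hg]
      rw [hrw]
      simp

-- proof-side views of A's five inlined slot steps as state transformers
def stepS (g S : List Gly) (s : List Gly × Nat) : List Gly × Nat :=
  if s.2 < g.length ∧ gAt g s.2 ∈ S then (s.1 ++ [gAt g s.2], s.2 + 1) else s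

def stepR (g R S : List Gly) (s : List Gly × Nat) : List Gly × Nat :=
  if s.2 < g.length then
    if gAt g s.2 ∈ R then whileRunA R g s.2 0 s.1
    else if gAt g s.2 ∈ S then (s.1 ++ [gAt g s.2], s.2 + 1) else s
  else s

lemma A_as_steps (g : List Gly) (pos : Nat) :
    parse_one_chunkA g pos =
      (let s5 := stepS g pvSLOT5 (stepR g pvSLOT4_RUNS pvSLOT4_SINGLE
        (stepS g pvSLOT3 (stepR g pvSLOT2_RUNS pvSLOT2_SINGLE
          (stepS g pvSLOT1 ([], pos)))));
       if s5.2 = pos then (none, s5.2) else (some s5.1, s5.2)) := rfl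

lemma stepS_eq (g S c : List Gly) (q : Nat) :
    stepS g S (c, q) =
      (c ++ (g.drop q).take (slotW g q [] 0 S), q + slotW g q [] 0 S) := by
  unfold stepS
  by_cases h : q < g.length ∧ gAt g q ∈ S
  · have hw : slotW g q [] 0 S = 1 := by
      simp only [slotW, runW]
      rw [if_pos ⟨trivial, h⟩]
    rw [if_pos h, hw, take_succ_drop h.1 0]
    simp
  · have hw : slotW g q [] 0 S = 0 := by
      simp only [slotW, runW]
      rw [if_neg (fun hc => h hc.2)]
    rw [if_neg h, hw]
    simp

lemma stepR_eq (g R S c : List Gly) (q : Nat) :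
    stepR g R S (c, q) =
      (c ++ (g.drop q).take (slotW g q R 3 S), q + slotW g q R 3 S) := by
  unfold stepR
  by_cases hq : q < g.length
  · by_cases hR : gAt g q ∈ R
    · rw [if_pos hq, if_pos hR, whileRunA_eq R g 3 q 0 c rfl]
      have hk : runW g q R 3 ≠ 0 := by
        simp only [runW]
        rw [if_pos ⟨hq, hR⟩]
        omega
      have hw : slotW g q R 3 S = runW g q R 3 := by
        simp only [slotW]
        rw [if_neg (fun hc => hk hc.1)]
      rw [hw]
    · have hk : runW g q R 3 = 0 := by
        simp only [runW]
        rw [if_neg (fun hc => hR hc.2)]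
      rw [if_pos hq, if_neg hR]
      by_cases hS : gAt g q ∈ S
      · have hw : slotW g q R 3 S = 1 := by
          simp only [slotW, hk]
          rw [if_pos ⟨trivial, hq, hS⟩]
        rw [if_pos hS, hw, take_succ_drop hq 0]
        simp
      · have hw : slotW g q R 3 S = 0 := by
          simp only [slotW, hk]
          rw [if_neg (fun hc => hS hc.2.2)]
        rw [if_neg hS, hw]
        all_goals simp
  · have hk : runW g q R 3 = 0 := by
      simp only [runW]
      rw [if_neg (fun hc => hq hc.1)]
    have hw : slotW g q R 3 S = 0 := by
      simp only [slotW, hk]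
      rw [if_neg (fun hc => hq hc.2.1)]
    rw [if_neg hq, hw]
    simp

lemma take_take_append (g : List Gly) (p a b : Nat) :
    (g.drop p).take a ++ (g.drop (p + a)).take b = (g.drop p).take (a + b) := by
  rw [List.take_add]
  congr 1
  rw [List.drop_drop]

lemma chunkA_eq (g : List Gly) (pos : Nat) :
    parse_one_chunkA g pos =
      (if E1 g pos = pos then none
       else some ((g.drop pos).take (E1 g pos - pos)), E1 g pos) := by
  rw [A_as_steps]
  rw [stepS_eq, stepR_eq, stepS_eq, stepR_eq, stepS_eq]
  simp only [E1, E2, E3, E4, E5, List.nil_append, Nat.add_assoc, take_take_append, Nat.add_sub_cancel_left]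
  split_ifs <;> rfl

-- monotonicity and out-of-range facts about the chunk ends
lemma E5_ge (g : List Gly) (q : Nat) : q ≤ E5 g q := Nat.le_add_right _ _
lemma E4_ge (g : List Gly) (q : Nat) : q ≤ E4 g q :=
  le_trans (Nat.le_add_right _ _) (E5_ge g _)
lemma E3_ge (g : List Gly) (q : Nat) : q ≤ E3 g q :=
  le_trans (Nat.le_add_right _ _) (E4_ge g _)
lemma E2_ge (g : List Gly) (q : Nat) : q ≤ E2 g q :=
  le_trans (Nat.le_add_right _ _) (E3_ge g _)
lemma E1_ge (g : List Gly) (q : Nat) : q ≤ E1 g q :=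
  le_trans (Nat.le_add_right _ _) (E2_ge g _)

lemma runW_out {g : List Gly} {q : Nat} (h : ¬ q < g.length) (R : List Gly) (m : Nat) :
    runW g q R m = 0 := by
  cases m <;> simp only [runW]
  exact if_neg (fun hc => h hc.1)

lemma slotW_out {g : List Gly} {q : Nat} (h : ¬ q < g.length) (R : List Gly) (m : Nat)
    (S : List Gly) : slotW g q R m S = 0 := by
  simp only [slotW, runW_out h]
  rw [if_neg (fun hc => h hc.2.1)]

lemma E5_out {g : List Gly} {q : Nat} (h : ¬ q < g.length) : E5 g q = q := by
  simp [E5, slotW_out h]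
lemma E4_out {g : List Gly} {q : Nat} (h : ¬ q < g.length) : E4 g q = q := by
  simp [E4, slotW_out h, E5_out h]
lemma E3_out {g : List Gly} {q : Nat} (h : ¬ q < g.length) : E3 g q = q := by
  simp [E3, slotW_out h, E4_out h]
lemma E2_out {g : List Gly} {q : Nat} (h : ¬ q < g.length) : E2 g q = q := by
  simp [E2, slotW_out h, E3_out h]
-- post-processing of loopB's exit state, as done by B's wrapper
def post (g : List Gly) (r : List (List Gly) × List Gly × List Gly × Nat) :
    List (List Gly) × List Gly :=
  ((if r.2.2.1 ≠ [] then r.1 ++ [r.2.2.1] else r.1), r.2.1 ++ g.drop r.2.2.2)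

-- ---- per-slot simulation lemmas for the automaton ----

lemma simC5 (g : List Gly) (chunks : List (List Gly)) (unp cur : List Gly) (q : Nat)
    (hch : chunks.length < 6) (hcur : cur ≠ []) :
    post g (loopB g chunks unp cur 5 0 q) =
      post g (loopB g (chunks ++ [cur ++ (g.drop q).take (E5 g q - q)]) unp [] 1 0 (E5 g q)) := by
  by_cases hq : q < g.length
  · by_cases h5 : gAt g q ∈ pvSLOT5
    · have hns : nextSlot (gAt g q) 5 0 = some 5 := by
        simp [nextSlot, List.range', List.find?, slotMatch, h5]
      have hW : slotW g q [] 0 pvSLOT5 = 1 := by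
        simp only [slotW, runW]
        rw [if_pos ⟨trivial, hq, h5⟩]
      have hE : E5 g q = q + 1 := by simp [E5, hW]
      conv_lhs => rw [loopB]
      rw [dif_pos ⟨hq, hch⟩]
      simp only [hns, hE, Nat.add_sub_cancel_left]
      rw [take_succ_drop hq 0]
      simp
    · have hns : nextSlot (gAt g q) 5 0 = none := by
        simp [nextSlot, List.range', List.find?, slotMatch, h5]
      have hW : slotW g q [] 0 pvSLOT5 = 0 := by
        simp only [slotW, runW]
        rw [if_neg (fun hc => h5 hc.2.2)]
      have hE : E5 g q = q := by simp [E5, hW]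
      conv_lhs => rw [loopB]
      rw [dif_pos ⟨hq, hch⟩]
      simp only [hns, hE, Nat.sub_self]
      rw [if_pos hcur]
      simp
  · have hE : E5 g q = q := E5_out hq
    rw [hE, Nat.sub_self]
    conv_lhs => rw [loopB]
    conv_rhs => rw [loopB]
    rw [dif_neg (fun hc => hq hc.1), dif_neg (fun hc => hq hc.1)]
    simp [post, hcur]

lemma simR4two (g : List Gly) (chunks : List (List Gly)) (unp cur : List Gly) (q : Nat)
    (hch : chunks.length < 6) (hcur : cur ≠ []) :
    post g (loopB g chunks unp cur 4 2 q) =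
      post g (loopB g (chunks ++ [cur ++ (g.drop q).take (E5 g (q + runW g q pvSLOT4_RUNS 1) - q)])
        unp [] 1 0 (E5 g (q + runW g q pvSLOT4_RUNS 1))) := by
  by_cases hq : q < g.length
  · by_cases hi : gAt g q = ['i']
    · have hns : nextSlot (gAt g q) 4 2 = some 4 := by rw [hi]; decide
      have hrW : runW g q pvSLOT4_RUNS 1 = 1 := by
        simp only [runW]
        rw [if_pos ⟨hq, by rw [hi]; decide⟩]
      conv_lhs => rw [loopB]
      rw [dif_pos ⟨hq, hch⟩]
      simp only [hns, hrW]
      norm_num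
      rw [simC5 g chunks unp (cur ++ [gAt g q]) (q + 1) hch (by simp)]
      have hX : q + 1 ≤ E5 g (q + 1) := E5_ge g (q + 1)
      have : E5 g (q + 1) - q = 1 + (E5 g (q + 1) - (q + 1)) := by omega
      rw [this, take_succ_drop hq]
      simp
    · have hmem : ¬ gAt g q ∈ pvSLOT4_RUNS := by simp [pvSLOT4_RUNS, hi]
      have hrW : runW g q pvSLOT4_RUNS 1 = 0 := by
        simp only [runW]
        rw [if_neg (fun hc => hmem hc.2)]
      by_cases h5 : gAt g q ∈ pvSLOT5
      · have hns : nextSlot (gAt g q) 4 2 = some 5 := by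
          simp [nextSlot, List.find?, slotMatch, h5, runGlyph, hi]
        have hW : slotW g q [] 0 pvSLOT5 = 1 := by
          simp only [slotW, runW]
          rw [if_pos ⟨trivial, hq, h5⟩]
        have hE : E5 g q = q + 1 := by simp [E5, hW]
        conv_lhs => rw [loopB]
        rw [dif_pos ⟨hq, hch⟩]
        simp only [hns, hrW, Nat.add_zero, hE, Nat.add_sub_cancel_left]
        rw [take_succ_drop hq 0]
        simp
      · have hns : nextSlot (gAt g q) 4 2 = none := by
          simp [nextSlot, List.find?, slotMatch, h5, runGlyph, hi]
        have hW : slotW g q [] 0 pvSLOT5 = 0 := by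
          simp only [slotW, runW]
          rw [if_neg (fun hc => h5 hc.2.2)]
        have hE : E5 g q = q := by simp [E5, hW]
        conv_lhs => rw [loopB]
        rw [dif_pos ⟨hq, hch⟩]
        simp only [hns, hrW, Nat.add_zero, hE, Nat.sub_self]
        rw [if_pos hcur]
        simp
  · have hrW : runW g q pvSLOT4_RUNS 1 = runW g q pvSLOT4_RUNS 1 := rfl
    rw [runW_out hq, Nat.add_zero, E5_out hq, Nat.sub_self]
    conv_lhs => rw [loopB]
    conv_rhs => rw [loopB]
    rw [dif_neg (fun hc => hq hc.1), dif_neg (fun hc => hq hc.1)]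
    simp [post, hcur]

lemma simR4one (g : List Gly) (chunks : List (List Gly)) (unp cur : List Gly) (q : Nat)
    (hch : chunks.length < 6) (hcur : cur ≠ []) :
    post g (loopB g chunks unp cur 4 1 q) =
      post g (loopB g (chunks ++ [cur ++ (g.drop q).take (E5 g (q + runW g q pvSLOT4_RUNS 2) - q)])
        unp [] 1 0 (E5 g (q + runW g q pvSLOT4_RUNS 2))) := by
  by_cases hq : q < g.length
  · by_cases hi : gAt g q = ['i']
    · have hns : nextSlot (gAt g q) 4 1 = some 4 := by rw [hi]; decide
      have hrW : runW g q pvSLOT4_RUNS 2 = 1 + runW g (q + 1) pvSLOT4_RUNS 1 := by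
        show (if q < g.length ∧ gAt g q ∈ pvSLOT4_RUNS then 1 + runW g (q + 1) pvSLOT4_RUNS 1 else 0) = _
        rw [if_pos ⟨hq, by rw [hi]; decide⟩]
      conv_lhs => rw [loopB]
      rw [dif_pos ⟨hq, hch⟩]
      simp only [hns]
      norm_num [hi, runGlyph]
      rw [simR4two g chunks unp (cur ++ [['i']]) (q + 1) hch (by simp)]
      have hX : q + 1 + runW g (q + 1) pvSLOT4_RUNS 1 ≤ E5 g (q + 1 + runW g (q + 1) pvSLOT4_RUNS 1) := E5_ge g _
      have harr : q + runW g q pvSLOT4_RUNS 2 = q + 1 + runW g (q + 1) pvSLOT4_RUNS 1 := by omega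
      rw [harr]
      have : E5 g (q + 1 + runW g (q + 1) pvSLOT4_RUNS 1) - q
           = 1 + (E5 g (q + 1 + runW g (q + 1) pvSLOT4_RUNS 1) - (q + 1)) := by omega
      rw [this, take_succ_drop hq]
      simp [hi]
    · have hmem : ¬ gAt g q ∈ pvSLOT4_RUNS := by simp [pvSLOT4_RUNS, hi]
      have hrW : runW g q pvSLOT4_RUNS 2 = 0 := by
        simp only [runW]
        rw [if_neg (fun hc => hmem hc.2)]
      by_cases h5 : gAt g q ∈ pvSLOT5
      · have hns : nextSlot (gAt g q) 4 1 = some 5 := by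
          simp [nextSlot, List.find?, slotMatch, h5, runGlyph, hi]
        have hW : slotW g q [] 0 pvSLOT5 = 1 := by
          simp only [slotW, runW]
          rw [if_pos ⟨trivial, hq, h5⟩]
        have hE : E5 g q = q + 1 := by simp [E5, hW]
        conv_lhs => rw [loopB]
        rw [dif_pos ⟨hq, hch⟩]
        simp only [hns, hrW, Nat.add_zero, hE, Nat.add_sub_cancel_left]
        rw [take_succ_drop hq 0]
        simp
      · have hns : nextSlot (gAt g q) 4 1 = none := by
          simp [nextSlot, List.find?, slotMatch, h5, runGlyph, hi]
        have hW : slotW g q [] 0 pvSLOT5 = 0 := by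
          simp only [slotW, runW]
          rw [if_neg (fun hc => h5 hc.2.2)]
        have hE : E5 g q = q := by simp [E5, hW]
        conv_lhs => rw [loopB]
        rw [dif_pos ⟨hq, hch⟩]
        simp only [hns, hrW, Nat.add_zero, hE, Nat.sub_self]
        rw [if_pos hcur]
        simp
  · rw [runW_out hq, Nat.add_zero, E5_out hq, Nat.sub_self]
    conv_lhs => rw [loopB]
    conv_rhs => rw [loopB]
    rw [dif_neg (fun hc => hq hc.1), dif_neg (fun hc => hq hc.1)]
    simp [post, hcur]

lemma simC4 (g : List Gly) (chunks : List (List Gly)) (unp cur : List Gly) (q : Nat)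
    (hch : chunks.length < 6) (hcur : cur ≠ []) :
    post g (loopB g chunks unp cur 4 0 q) =
      post g (loopB g (chunks ++ [cur ++ (g.drop q).take (E4 g q - q)]) unp [] 1 0 (E4 g q)) := by
  by_cases hq : q < g.length
  · by_cases hi : gAt g q = ['i']
    · have hns : nextSlot (gAt g q) 4 0 = some 4 := by rw [hi]; decide
      have hrW : runW g q pvSLOT4_RUNS 3 = 1 + runW g (q + 1) pvSLOT4_RUNS 2 := by
        show (if q < g.length ∧ gAt g q ∈ pvSLOT4_RUNS then 1 + runW g (q + 1) pvSLOT4_RUNS 2 else 0) = _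
        rw [if_pos ⟨hq, by rw [hi]; decide⟩]
      have hW : slotW g q pvSLOT4_RUNS 3 pvSLOT4_SINGLE = runW g q pvSLOT4_RUNS 3 := by
        simp only [slotW]
        rw [if_neg (by rw [hrW]; omega)]
      have hE : E4 g q = E5 g (q + 1 + runW g (q + 1) pvSLOT4_RUNS 2) := by
        rw [E4, hW, hrW]; ring_nf
      conv_lhs => rw [loopB]
      rw [dif_pos ⟨hq, hch⟩]
      simp only [hns]
      norm_num [hi, runGlyph]
      rw [simR4one g chunks unp (cur ++ [['i']]) (q + 1) hch (by simp)]
      rw [hE]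
      have hX : q + 1 + runW g (q + 1) pvSLOT4_RUNS 2 ≤ E5 g (q + 1 + runW g (q + 1) pvSLOT4_RUNS 2) := E5_ge g _
      have : E5 g (q + 1 + runW g (q + 1) pvSLOT4_RUNS 2) - q
           = 1 + (E5 g (q + 1 + runW g (q + 1) pvSLOT4_RUNS 2) - (q + 1)) := by omega
      rw [this, take_succ_drop hq]
      simp [hi]
    · have hmem : ¬ gAt g q ∈ pvSLOT4_RUNS := by simp [pvSLOT4_RUNS, hi]
      have hrW : runW g q pvSLOT4_RUNS 3 = 0 := by
        show (if q < g.length ∧ gAt g q ∈ pvSLOT4_RUNS then 1 + runW g (q + 1) pvSLOT4_RUNS 2 else 0) = _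
        rw [if_neg (fun hc => hmem hc.2)]
      by_cases hd : gAt g q = ['d']
      · have hns : nextSlot (gAt g q) 4 0 = some 4 := by rw [hd]; decide
        have hW : slotW g q pvSLOT4_RUNS 3 pvSLOT4_SINGLE = 1 := by
          simp only [slotW, hrW]
          rw [if_pos ⟨trivial, hq, by rw [hd]; decide⟩]
        have hE : E4 g q = E5 g (q + 1) := by rw [E4, hW]
        conv_lhs => rw [loopB]
        rw [dif_pos ⟨hq, hch⟩]
        simp only [hns]
        norm_num [hd, runGlyph]
        rw [if_neg (by decide : ¬ ('d' = 'i'))]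
        rw [simC5 g chunks unp (cur ++ [['d']]) (q + 1) hch (by simp)]
        rw [hE]
        have hX : q + 1 ≤ E5 g (q + 1) := E5_ge g _
        have : E5 g (q + 1) - q = 1 + (E5 g (q + 1) - (q + 1)) := by omega
        rw [this, take_succ_drop hq]
        simp [hd]
      · have hW : slotW g q pvSLOT4_RUNS 3 pvSLOT4_SINGLE = 0 := by
          simp only [slotW, hrW]
          rw [if_neg (fun hc => hd (by simpa [pvSLOT4_SINGLE] using hc.2.2))]
        by_cases h5 : gAt g q ∈ pvSLOT5
        · have hns : nextSlot (gAt g q) 4 0 = some 5 := by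
            simp only [nextSlot, slotMatch, h5]
            norm_num
            refine ⟨h5, fun j hj1 hj2 => ?_⟩
            have : j = 4 := by omega
            subst this
            simp [hi, hd]
          have hW5 : slotW g q [] 0 pvSLOT5 = 1 := by
            simp only [slotW, runW]
            rw [if_pos ⟨trivial, hq, h5⟩]
          have hE : E4 g q = q + 1 := by simp [E4, hW, E5, hW5]
          conv_lhs => rw [loopB]
          rw [dif_pos ⟨hq, hch⟩]
          simp only [hns, hE, Nat.add_sub_cancel_left]
          rw [take_succ_drop hq 0]
          simp
        · have hns : nextSlot (gAt g q) 4 0 = none := by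
            simp only [nextSlot, slotMatch]
            norm_num
            intro j hj1 hj2
            interval_cases j
            · simp [hi, hd]
            · simpa using h5
          have hW5 : slotW g q [] 0 pvSLOT5 = 0 := by
            simp only [slotW, runW]
            rw [if_neg (fun hc => h5 hc.2.2)]
          have hE : E4 g q = q := by simp [E4, hW, E5, hW5]
          conv_lhs => rw [loopB]
          rw [dif_pos ⟨hq, hch⟩]
          simp only [hns, hE, Nat.sub_self]
          rw [if_pos hcur]
          simp
  · rw [E4_out hq, Nat.sub_self]
    conv_lhs => rw [loopB]
    conv_rhs => rw [loopB]
    rw [dif_neg (fun hc => hq hc.1), dif_neg (fun hc => hq hc.1)]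
    simp [post, hcur]

lemma simC3 (g : List Gly) (chunks : List (List Gly)) (unp cur : List Gly) (q : Nat)
    (hch : chunks.length < 6) (hcur : cur ≠ []) :
    post g (loopB g chunks unp cur 3 0 q) =
      post g (loopB g (chunks ++ [cur ++ (g.drop q).take (E3 g q - q)]) unp [] 1 0 (E3 g q)) := by
  by_cases hq : q < g.length
  · by_cases ho : gAt g q = ['o']
    · have hns : nextSlot (gAt g q) 3 0 = some 3 := by rw [ho]; decide
      have hW : slotW g q [] 0 pvSLOT3 = 1 := by
        simp only [slotW, runW]
        rw [if_pos ⟨trivial, hq, by rw [ho]; decide⟩]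
      have hE : E3 g q = E4 g (q + 1) := by rw [E3, hW]
      conv_lhs => rw [loopB]
      rw [dif_pos ⟨hq, hch⟩]
      simp only [hns]
      norm_num [ho, runGlyph]
      rw [simC4 g chunks unp (cur ++ [['o']]) (q + 1) hch (by simp)]
      rw [hE]
      have hX : q + 1 ≤ E4 g (q + 1) := E4_ge g _
      have : E4 g (q + 1) - q = 1 + (E4 g (q + 1) - (q + 1)) := by omega
      rw [this, take_succ_drop hq]
      simp [ho]
    · have hW3 : slotW g q [] 0 pvSLOT3 = 0 := by
        simp only [slotW, runW]
        rw [if_neg (fun hc => ho (by simpa [pvSLOT3] using hc.2.2))]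
      have hE30 : E3 g q = E4 g q := by rw [E3, hW3, Nat.add_zero]
      by_cases hi : gAt g q = ['i']
      · have hns : nextSlot (gAt g q) 3 0 = some 4 := by rw [hi]; decide
        have hrW : runW g q pvSLOT4_RUNS 3 = 1 + runW g (q + 1) pvSLOT4_RUNS 2 := by
          show (if q < g.length ∧ gAt g q ∈ pvSLOT4_RUNS then 1 + runW g (q + 1) pvSLOT4_RUNS 2 else 0) = _
          rw [if_pos ⟨hq, by rw [hi]; decide⟩]
        have hW : slotW g q pvSLOT4_RUNS 3 pvSLOT4_SINGLE = runW g q pvSLOT4_RUNS 3 := by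
          simp only [slotW]
          rw [if_neg (by rw [hrW]; omega)]
        have hE : E3 g q = E5 g (q + 1 + runW g (q + 1) pvSLOT4_RUNS 2) := by
          rw [hE30, E4, hW, hrW]; ring_nf
        conv_lhs => rw [loopB]
        rw [dif_pos ⟨hq, hch⟩]
        simp only [hns]
        norm_num [hi, runGlyph]
        rw [simR4one g chunks unp (cur ++ [['i']]) (q + 1) hch (by simp)]
        rw [hE]
        have hX : q + 1 + runW g (q + 1) pvSLOT4_RUNS 2 ≤ E5 g (q + 1 + runW g (q + 1) pvSLOT4_RUNS 2) := E5_ge g _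
        have : E5 g (q + 1 + runW g (q + 1) pvSLOT4_RUNS 2) - q
             = 1 + (E5 g (q + 1 + runW g (q + 1) pvSLOT4_RUNS 2) - (q + 1)) := by omega
        rw [this, take_succ_drop hq]
        simp [hi]
      · have hmem : ¬ gAt g q ∈ pvSLOT4_RUNS := by simp [pvSLOT4_RUNS, hi]
        have hrW : runW g q pvSLOT4_RUNS 3 = 0 := by
          show (if q < g.length ∧ gAt g q ∈ pvSLOT4_RUNS then 1 + runW g (q + 1) pvSLOT4_RUNS 2 else 0) = _
          rw [if_neg (fun hc => hmem hc.2)]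
        by_cases hd : gAt g q = ['d']
        · have hns : nextSlot (gAt g q) 3 0 = some 4 := by rw [hd]; decide
          have hW : slotW g q pvSLOT4_RUNS 3 pvSLOT4_SINGLE = 1 := by
            simp only [slotW, hrW]
            rw [if_pos ⟨trivial, hq, by rw [hd]; decide⟩]
          have hE : E3 g q = E5 g (q + 1) := by rw [hE30, E4, hW]
          conv_lhs => rw [loopB]
          rw [dif_pos ⟨hq, hch⟩]
          simp only [hns]
          norm_num [hd, runGlyph]
          rw [if_neg (by decide : ¬ ('d' = 'i'))]
          rw [simC5 g chunks unp (cur ++ [['d']]) (q + 1) hch (by simp)]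
          rw [hE]
          have hX : q + 1 ≤ E5 g (q + 1) := E5_ge g _
          have : E5 g (q + 1) - q = 1 + (E5 g (q + 1) - (q + 1)) := by omega
          rw [this, take_succ_drop hq]
          simp [hd]
        · have hW4 : slotW g q pvSLOT4_RUNS 3 pvSLOT4_SINGLE = 0 := by
            simp only [slotW, hrW]
            rw [if_neg (fun hc => hd (by simpa [pvSLOT4_SINGLE] using hc.2.2))]
          have hE40 : E3 g q = E5 g q := by rw [hE30, E4, hW4, Nat.add_zero]
          by_cases h5 : gAt g q ∈ pvSLOT5
          · have hns : nextSlot (gAt g q) 3 0 = some 5 := by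
              simp only [nextSlot, slotMatch]
              norm_num
              refine ⟨h5, fun j hj1 hj2 => ?_⟩
              interval_cases j
              · simp [pvSLOT3, ho]
              · simp [hi, hd]
            have hW5 : slotW g q [] 0 pvSLOT5 = 1 := by
              simp only [slotW, runW]
              rw [if_pos ⟨trivial, hq, h5⟩]
            have hE : E3 g q = q + 1 := by rw [hE40, E5, hW5]
            conv_lhs => rw [loopB]
            rw [dif_pos ⟨hq, hch⟩]
            simp only [hns, hE, Nat.add_sub_cancel_left]
            rw [take_succ_drop hq 0]
            simp
          · have hns : nextSlot (gAt g q) 3 0 = none := by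
              simp only [nextSlot, slotMatch]
              norm_num
              intro j hj1 hj2
              interval_cases j
              · simp [pvSLOT3, ho]
              · simp [hi, hd]
              · simpa using h5
            have hW5 : slotW g q [] 0 pvSLOT5 = 0 := by
              simp only [slotW, runW]
              rw [if_neg (fun hc => h5 hc.2.2)]
            have hE : E3 g q = q := by rw [hE40, E5, hW5, Nat.add_zero]
            conv_lhs => rw [loopB]
            rw [dif_pos ⟨hq, hch⟩]
            simp only [hns, hE, Nat.sub_self]
            rw [if_pos hcur]
            simp
  · rw [E3_out hq, Nat.sub_self]
    conv_lhs => rw [loopB]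
    conv_rhs => rw [loopB]
    rw [dif_neg (fun hc => hq hc.1), dif_neg (fun hc => hq hc.1)]
    simp [post, hcur]

lemma shift2 (g : List Gly) (chunks : List (List Gly)) (unp cur : List Gly) (q r : Nat)
    (hr : r ≠ 0) (he : gAt g q ≠ ['e']) :
    loopB g chunks unp cur 2 r q = loopB g chunks unp cur 3 0 q := by
  conv_lhs => rw [loopB.eq_def]
  conv_rhs => rw [loopB.eq_def]
  by_cases h : q < g.length ∧ chunks.length < 6
  · rw [dif_pos h, dif_pos h]
    have hns : nextSlot (gAt g q) 2 r = nextSlot (gAt g q) 3 0 := by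
      simp [nextSlot, hr, he, runGlyph]
    simp only [hns]
    cases hfind : nextSlot (gAt g q) 3 0 with
    | none => simp only [hfind]
    | some t =>
      simp only [hfind]
      have ht : t = 3 ∨ t = 4 ∨ t = 5 := by
        have h0 : nextSlot (gAt g q) 3 0 =
            List.find? (fun t => decide (gAt g q ∈ slotMatch t)) [3, 4, 5] := by
          have : List.range' 3 3 = [3, 4, 5] := rfl
          simp only [nextSlot]
          norm_num [this]
        rw [h0] at hfind
        have := List.mem_of_find?_eq_some hfind
        simpa using this
      rcases ht with rfl | rfl | rfl <;> norm_num
  · rw [dif_neg h, dif_neg h]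

lemma simR2two (g : List Gly) (chunks : List (List Gly)) (unp cur : List Gly) (q : Nat)
    (hch : chunks.length < 6) (hcur : cur ≠ []) :
    post g (loopB g chunks unp cur 2 2 q) =
      post g (loopB g (chunks ++ [cur ++ (g.drop q).take (E3 g (q + runW g q pvSLOT2_RUNS 1) - q)])
        unp [] 1 0 (E3 g (q + runW g q pvSLOT2_RUNS 1))) := by
  by_cases hq : q < g.length
  · by_cases he : gAt g q = ['e']
    · have hns : nextSlot (gAt g q) 2 2 = some 2 := by rw [he]; decide
      have hrW : runW g q pvSLOT2_RUNS 1 = 1 := by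
        simp only [runW]
        rw [if_pos ⟨hq, by rw [he]; decide⟩]
      conv_lhs => rw [loopB]
      rw [dif_pos ⟨hq, hch⟩]
      simp only [hns, hrW]
      norm_num [he, runGlyph]
      rw [simC3 g chunks unp (cur ++ [['e']]) (q + 1) hch (by simp)]
      have hX : q + 1 ≤ E3 g (q + 1) := E3_ge g (q + 1)
      have : E3 g (q + 1) - q = 1 + (E3 g (q + 1) - (q + 1)) := by omega
      rw [this, take_succ_drop hq]
      simp [he]
    · have hrW : runW g q pvSLOT2_RUNS 1 = 0 := by
        simp only [runW]
        rw [if_neg (fun hc => he (by simpa [pvSLOT2_RUNS] using hc.2))]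
      rw [shift2 g chunks unp cur q 2 (by decide) he]
      rw [simC3 g chunks unp cur q hch hcur, hrW, Nat.add_zero]
  · rw [runW_out hq, Nat.add_zero, E3_out hq, Nat.sub_self]
    conv_lhs => rw [loopB]
    conv_rhs => rw [loopB]
    rw [dif_neg (fun hc => hq hc.1), dif_neg (fun hc => hq hc.1)]
    simp [post, hcur]

lemma simR2one (g : List Gly) (chunks : List (List Gly)) (unp cur : List Gly) (q : Nat)
    (hch : chunks.length < 6) (hcur : cur ≠ []) :
    post g (loopB g chunks unp cur 2 1 q) =
      post g (loopB g (chunks ++ [cur ++ (g.drop q).take (E3 g (q + runW g q pvSLOT2_RUNS 2) - q)])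
        unp [] 1 0 (E3 g (q + runW g q pvSLOT2_RUNS 2))) := by
  by_cases hq : q < g.length
  · by_cases he : gAt g q = ['e']
    · have hns : nextSlot (gAt g q) 2 1 = some 2 := by rw [he]; decide
      have hrW : runW g q pvSLOT2_RUNS 2 = 1 + runW g (q + 1) pvSLOT2_RUNS 1 := by
        show (if q < g.length ∧ gAt g q ∈ pvSLOT2_RUNS then 1 + runW g (q + 1) pvSLOT2_RUNS 1 else 0) = _
        rw [if_pos ⟨hq, by rw [he]; decide⟩]
      conv_lhs => rw [loopB]
      rw [dif_pos ⟨hq, hch⟩]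
      simp only [hns]
      norm_num [he, runGlyph]
      rw [simR2two g chunks unp (cur ++ [['e']]) (q + 1) hch (by simp)]
      have hX : q + 1 + runW g (q + 1) pvSLOT2_RUNS 1 ≤ E3 g (q + 1 + runW g (q + 1) pvSLOT2_RUNS 1) := E3_ge g _
      have harr : q + runW g q pvSLOT2_RUNS 2 = q + 1 + runW g (q + 1) pvSLOT2_RUNS 1 := by omega
      rw [harr]
      have : E3 g (q + 1 + runW g (q + 1) pvSLOT2_RUNS 1) - q
           = 1 + (E3 g (q + 1 + runW g (q + 1) pvSLOT2_RUNS 1) - (q + 1)) := by omega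
      rw [this, take_succ_drop hq]
      simp [he]
    · have hrW : runW g q pvSLOT2_RUNS 2 = 0 := by
        show (if q < g.length ∧ gAt g q ∈ pvSLOT2_RUNS then 1 + runW g (q + 1) pvSLOT2_RUNS 1 else 0) = _
        rw [if_neg (fun hc => he (by simpa [pvSLOT2_RUNS] using hc.2))]
      rw [shift2 g chunks unp cur q 1 (by decide) he]
      rw [simC3 g chunks unp cur q hch hcur, hrW, Nat.add_zero]
  · rw [runW_out hq, Nat.add_zero, E3_out hq, Nat.sub_self]
    conv_lhs => rw [loopB]
    conv_rhs => rw [loopB]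
    rw [dif_neg (fun hc => hq hc.1), dif_neg (fun hc => hq hc.1)]
    simp [post, hcur]

lemma simC2 (g : List Gly) (chunks : List (List Gly)) (unp cur : List Gly) (q : Nat)
    (hch : chunks.length < 6) (hcur : cur ≠ []) :
    post g (loopB g chunks unp cur 2 0 q) =
      post g (loopB g (chunks ++ [cur ++ (g.drop q).take (E2 g q - q)]) unp [] 1 0 (E2 g q)) := by
  by_cases hq : q < g.length
  · by_cases he : gAt g q = ['e']
    · have hns : nextSlot (gAt g q) 2 0 = some 2 := by rw [he]; decide
      have hrW : runW g q pvSLOT2_RUNS 3 = 1 + runW g (q + 1) pvSLOT2_RUNS 2 := by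
        show (if q < g.length ∧ gAt g q ∈ pvSLOT2_RUNS then 1 + runW g (q + 1) pvSLOT2_RUNS 2 else 0) = _
        rw [if_pos ⟨hq, by rw [he]; decide⟩]
      have hW : slotW g q pvSLOT2_RUNS 3 pvSLOT2_SINGLE = runW g q pvSLOT2_RUNS 3 := by
        simp only [slotW]
        rw [if_neg (by rw [hrW]; omega)]
      have hE : E2 g q = E3 g (q + 1 + runW g (q + 1) pvSLOT2_RUNS 2) := by
        rw [E2, hW, hrW]; ring_nf
      conv_lhs => rw [loopB]
      rw [dif_pos ⟨hq, hch⟩]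
      simp only [hns]
      norm_num [he, runGlyph]
      rw [simR2one g chunks unp (cur ++ [['e']]) (q + 1) hch (by simp)]
      rw [hE]
      have hX : q + 1 + runW g (q + 1) pvSLOT2_RUNS 2 ≤ E3 g (q + 1 + runW g (q + 1) pvSLOT2_RUNS 2) := E3_ge g _
      have : E3 g (q + 1 + runW g (q + 1) pvSLOT2_RUNS 2) - q
           = 1 + (E3 g (q + 1 + runW g (q + 1) pvSLOT2_RUNS 2) - (q + 1)) := by omega
      rw [this, take_succ_drop hq]
      simp [he]
    · have hmem2 : ¬ gAt g q ∈ pvSLOT2_RUNS := by simp [pvSLOT2_RUNS, he]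
      have hrW : runW g q pvSLOT2_RUNS 3 = 0 := by
        show (if q < g.length ∧ gAt g q ∈ pvSLOT2_RUNS then 1 + runW g (q + 1) pvSLOT2_RUNS 2 else 0) = _
        rw [if_neg (fun hc => hmem2 hc.2)]
      by_cases hqa : gAt g q = ['q'] ∨ gAt g q = ['a']
      · have hns : nextSlot (gAt g q) 2 0 = some 2 := by
          rcases hqa with h' | h' <;> (rw [h']; decide)
        have hW : slotW g q pvSLOT2_RUNS 3 pvSLOT2_SINGLE = 1 := by
          simp only [slotW, hrW]
          rw [if_pos ⟨trivial, hq, by rcases hqa with h' | h' <;> (rw [h']; decide)⟩]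
        have hE : E2 g q = E3 g (q + 1) := by rw [E2, hW]
        conv_lhs => rw [loopB]
        rw [dif_pos ⟨hq, hch⟩]
        simp only [hns]
        norm_num [runGlyph, he]
        rw [simC3 g chunks unp (cur ++ [gAt g q]) (q + 1) hch (by simp)]
        rw [hE]
        have hX : q + 1 ≤ E3 g (q + 1) := E3_ge g _
        have : E3 g (q + 1) - q = 1 + (E3 g (q + 1) - (q + 1)) := by omega
        rw [this, take_succ_drop hq]
        simp
      · push_neg at hqa
        have hW2 : slotW g q pvSLOT2_RUNS 3 pvSLOT2_SINGLE = 0 := by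
          simp only [slotW, hrW]
          rw [if_neg (fun hc => by
            rcases (by simpa [pvSLOT2_SINGLE] using hc.2.2 : gAt g q = ['q'] ∨ gAt g q = ['a']) with h' | h'
            exacts [hqa.1 h', hqa.2 h'])]
        have hE20 : E2 g q = E3 g q := by rw [E2, hW2, Nat.add_zero]
        by_cases ho : gAt g q = ['o']
        · have hns : nextSlot (gAt g q) 2 0 = some 3 := by rw [ho]; decide
          have hW : slotW g q [] 0 pvSLOT3 = 1 := by
            simp only [slotW, runW]
            rw [if_pos ⟨trivial, hq, by rw [ho]; decide⟩]
          have hE : E2 g q = E4 g (q + 1) := by rw [hE20, E3, hW]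
          conv_lhs => rw [loopB]
          rw [dif_pos ⟨hq, hch⟩]
          simp only [hns]
          norm_num [ho, runGlyph]
          rw [simC4 g chunks unp (cur ++ [['o']]) (q + 1) hch (by simp)]
          rw [hE]
          have hX : q + 1 ≤ E4 g (q + 1) := E4_ge g _
          have : E4 g (q + 1) - q = 1 + (E4 g (q + 1) - (q + 1)) := by omega
          rw [this, take_succ_drop hq]
          simp [ho]
        · have hW3 : slotW g q [] 0 pvSLOT3 = 0 := by
            simp only [slotW, runW]
            rw [if_neg (fun hc => ho (by simpa [pvSLOT3] using hc.2.2))]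
          have hE30 : E2 g q = E4 g q := by rw [hE20, E3, hW3, Nat.add_zero]
          by_cases hi : gAt g q = ['i']
          · have hns : nextSlot (gAt g q) 2 0 = some 4 := by rw [hi]; decide
            have hrW4 : runW g q pvSLOT4_RUNS 3 = 1 + runW g (q + 1) pvSLOT4_RUNS 2 := by
              show (if q < g.length ∧ gAt g q ∈ pvSLOT4_RUNS then 1 + runW g (q + 1) pvSLOT4_RUNS 2 else 0) = _
              rw [if_pos ⟨hq, by rw [hi]; decide⟩]
            have hW : slotW g q pvSLOT4_RUNS 3 pvSLOT4_SINGLE = runW g q pvSLOT4_RUNS 3 := by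
              simp only [slotW]
              rw [if_neg (by rw [hrW4]; omega)]
            have hE : E2 g q = E5 g (q + 1 + runW g (q + 1) pvSLOT4_RUNS 2) := by
              rw [hE30, E4, hW, hrW4]; ring_nf
            conv_lhs => rw [loopB]
            rw [dif_pos ⟨hq, hch⟩]
            simp only [hns]
            norm_num [hi, runGlyph]
            rw [simR4one g chunks unp (cur ++ [['i']]) (q + 1) hch (by simp)]
            rw [hE]
            have hX : q + 1 + runW g (q + 1) pvSLOT4_RUNS 2 ≤ E5 g (q + 1 + runW g (q + 1) pvSLOT4_RUNS 2) := E5_ge g _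
            have : E5 g (q + 1 + runW g (q + 1) pvSLOT4_RUNS 2) - q
                 = 1 + (E5 g (q + 1 + runW g (q + 1) pvSLOT4_RUNS 2) - (q + 1)) := by omega
            rw [this, take_succ_drop hq]
            simp [hi]
          · have hmem4 : ¬ gAt g q ∈ pvSLOT4_RUNS := by simp [pvSLOT4_RUNS, hi]
            have hrW4 : runW g q pvSLOT4_RUNS 3 = 0 := by
              show (if q < g.length ∧ gAt g q ∈ pvSLOT4_RUNS then 1 + runW g (q + 1) pvSLOT4_RUNS 2 else 0) = _
              rw [if_neg (fun hc => hmem4 hc.2)]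
            by_cases hd : gAt g q = ['d']
            · have hns : nextSlot (gAt g q) 2 0 = some 4 := by rw [hd]; decide
              have hW : slotW g q pvSLOT4_RUNS 3 pvSLOT4_SINGLE = 1 := by
                simp only [slotW, hrW4]
                rw [if_pos ⟨trivial, hq, by rw [hd]; decide⟩]
              have hE : E2 g q = E5 g (q + 1) := by rw [hE30, E4, hW]
              conv_lhs => rw [loopB]
              rw [dif_pos ⟨hq, hch⟩]
              simp only [hns]
              norm_num [hd, runGlyph]
              rw [if_neg (by decide : ¬ ('d' = 'i'))]
              rw [simC5 g chunks unp (cur ++ [['d']]) (q + 1) hch (by simp)]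
              rw [hE]
              have hX : q + 1 ≤ E5 g (q + 1) := E5_ge g _
              have : E5 g (q + 1) - q = 1 + (E5 g (q + 1) - (q + 1)) := by omega
              rw [this, take_succ_drop hq]
              simp [hd]
            · have hW4 : slotW g q pvSLOT4_RUNS 3 pvSLOT4_SINGLE = 0 := by
                simp only [slotW, hrW4]
                rw [if_neg (fun hc => hd (by simpa [pvSLOT4_SINGLE] using hc.2.2))]
              have hE40 : E2 g q = E5 g q := by rw [hE30, E4, hW4, Nat.add_zero]
              by_cases h5 : gAt g q ∈ pvSLOT5
              · have hns : nextSlot (gAt g q) 2 0 = some 5 := by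
                  simp only [nextSlot, slotMatch]
                  norm_num
                  refine ⟨h5, fun j hj1 hj2 => ?_⟩
                  interval_cases j
                  · simp [he, hqa.1, hqa.2]
                  · simp [pvSLOT3, ho]
                  · simp [hi, hd]
                have hW5 : slotW g q [] 0 pvSLOT5 = 1 := by
                  simp only [slotW, runW]
                  rw [if_pos ⟨trivial, hq, h5⟩]
                have hE : E2 g q = q + 1 := by rw [hE40, E5, hW5]
                conv_lhs => rw [loopB]
                rw [dif_pos ⟨hq, hch⟩]
                simp only [hns, hE, Nat.add_sub_cancel_left]
                rw [take_succ_drop hq 0]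
                simp
              · have hns : nextSlot (gAt g q) 2 0 = none := by
                  simp only [nextSlot, slotMatch]
                  norm_num
                  intro j hj1 hj2
                  interval_cases j
                  · simp [he, hqa.1, hqa.2]
                  · simp [pvSLOT3, ho]
                  · simp [hi, hd]
                  · simpa using h5
                have hW5 : slotW g q [] 0 pvSLOT5 = 0 := by
                  simp only [slotW, runW]
                  rw [if_neg (fun hc => h5 hc.2.2)]
                have hE : E2 g q = q := by rw [hE40, E5, hW5, Nat.add_zero]
                conv_lhs => rw [loopB]
                rw [dif_pos ⟨hq, hch⟩]
                simp only [hns, hE, Nat.sub_self]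
                rw [if_pos hcur]
                simp
  · rw [E2_out hq, Nat.sub_self]
    conv_lhs => rw [loopB]
    conv_rhs => rw [loopB]
    rw [dif_neg (fun hc => hq hc.1), dif_neg (fun hc => hq hc.1)]
    simp [post, hcur]

lemma simC1 (g : List Gly) (chunks : List (List Gly)) (unp : List Gly) (q : Nat)
    (hq : q < g.length) (hch : chunks.length < 6) (hpos : E1 g q > q) :
    post g (loopB g chunks unp [] 1 0 q) =
      post g (loopB g (chunks ++ [(g.drop q).take (E1 g q - q)]) unp [] 1 0 (E1 g q)) := by
  by_cases h1 : gAt g q ∈ pvSLOT1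
  · have hns : nextSlot (gAt g q) 1 0 = some 1 := by
      simp [nextSlot, slotMatch, h1]
      intro j hj1 hj2
      omega
    have hW : slotW g q [] 0 pvSLOT1 = 1 := by
      simp only [slotW, runW]
      rw [if_pos ⟨trivial, hq, h1⟩]
    have hE : E1 g q = E2 g (q + 1) := by rw [E1, hW]
    conv_lhs => rw [loopB]
    rw [dif_pos ⟨hq, hch⟩]
    simp only [hns]
    norm_num
    rw [simC2 g chunks unp [gAt g q] (q + 1) hch (by simp)]
    rw [hE]
    have hX : q + 1 ≤ E2 g (q + 1) := E2_ge g _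
    have : E2 g (q + 1) - q = 1 + (E2 g (q + 1) - (q + 1)) := by omega
    rw [this, take_succ_drop hq]
    simp
  · have hW1 : slotW g q [] 0 pvSLOT1 = 0 := by
      simp only [slotW, runW]
      rw [if_neg (fun hc => h1 hc.2.2)]
    have hE10 : E1 g q = E2 g q := by rw [E1, hW1, Nat.add_zero]
    by_cases he : gAt g q = ['e']
    · have hns : nextSlot (gAt g q) 1 0 = some 2 := by rw [he]; decide
      have hrW : runW g q pvSLOT2_RUNS 3 = 1 + runW g (q + 1) pvSLOT2_RUNS 2 := by
        show (if q < g.length ∧ gAt g q ∈ pvSLOT2_RUNS then 1 + runW g (q + 1) pvSLOT2_RUNS 2 else 0) = _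
        rw [if_pos ⟨hq, by rw [he]; decide⟩]
      have hW : slotW g q pvSLOT2_RUNS 3 pvSLOT2_SINGLE = runW g q pvSLOT2_RUNS 3 := by
        simp only [slotW]
        rw [if_neg (by rw [hrW]; omega)]
      have hE : E1 g q = E3 g (q + 1 + runW g (q + 1) pvSLOT2_RUNS 2) := by
        rw [hE10, E2, hW, hrW]; ring_nf
      conv_lhs => rw [loopB]
      rw [dif_pos ⟨hq, hch⟩]
      simp only [hns]
      norm_num [he, runGlyph]
      rw [simR2one g chunks unp [['e']] (q + 1) hch (by simp)]
      rw [hE]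
      have hX : q + 1 + runW g (q + 1) pvSLOT2_RUNS 2 ≤ E3 g (q + 1 + runW g (q + 1) pvSLOT2_RUNS 2) := E3_ge g _
      have : E3 g (q + 1 + runW g (q + 1) pvSLOT2_RUNS 2) - q
           = 1 + (E3 g (q + 1 + runW g (q + 1) pvSLOT2_RUNS 2) - (q + 1)) := by omega
      rw [this, take_succ_drop hq]
      simp [he]
    · have hmem2 : ¬ gAt g q ∈ pvSLOT2_RUNS := by simp [pvSLOT2_RUNS, he]
      have hrW2 : runW g q pvSLOT2_RUNS 3 = 0 := by
        show (if q < g.length ∧ gAt g q ∈ pvSLOT2_RUNS then 1 + runW g (q + 1) pvSLOT2_RUNS 2 else 0) = _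
        rw [if_neg (fun hc => hmem2 hc.2)]
      by_cases hqa : gAt g q = ['q'] ∨ gAt g q = ['a']
      · have hns : nextSlot (gAt g q) 1 0 = some 2 := by
          rcases hqa with h' | h' <;> (rw [h']; decide)
        have hW : slotW g q pvSLOT2_RUNS 3 pvSLOT2_SINGLE = 1 := by
          simp only [slotW, hrW2]
          rw [if_pos ⟨trivial, hq, by rcases hqa with h' | h' <;> (rw [h']; decide)⟩]
        have hE : E1 g q = E3 g (q + 1) := by rw [hE10, E2, hW]
        conv_lhs => rw [loopB]
        rw [dif_pos ⟨hq, hch⟩]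
        simp only [hns]
        norm_num [runGlyph, he]
        rw [simC3 g chunks unp [gAt g q] (q + 1) hch (by simp)]
        rw [hE]
        have hX : q + 1 ≤ E3 g (q + 1) := E3_ge g _
        have : E3 g (q + 1) - q = 1 + (E3 g (q + 1) - (q + 1)) := by omega
        rw [this, take_succ_drop hq]
        simp
      · push_neg at hqa
        have hW2 : slotW g q pvSLOT2_RUNS 3 pvSLOT2_SINGLE = 0 := by
          simp only [slotW, hrW2]
          rw [if_neg (fun hc => by
            rcases (by simpa [pvSLOT2_SINGLE] using hc.2.2 : gAt g q = ['q'] ∨ gAt g q = ['a']) with h' | h'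
            exacts [hqa.1 h', hqa.2 h'])]
        have hE20 : E1 g q = E3 g q := by rw [hE10, E2, hW2, Nat.add_zero]
        by_cases ho : gAt g q = ['o']
        · have hns : nextSlot (gAt g q) 1 0 = some 3 := by rw [ho]; decide
          have hW : slotW g q [] 0 pvSLOT3 = 1 := by
            simp only [slotW, runW]
            rw [if_pos ⟨trivial, hq, by rw [ho]; decide⟩]
          have hE : E1 g q = E4 g (q + 1) := by rw [hE20, E3, hW]
          conv_lhs => rw [loopB]
          rw [dif_pos ⟨hq, hch⟩]
          simp only [hns]
          norm_num [ho, runGlyph]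
          rw [simC4 g chunks unp [['o']] (q + 1) hch (by simp)]
          rw [hE]
          have hX : q + 1 ≤ E4 g (q + 1) := E4_ge g _
          have : E4 g (q + 1) - q = 1 + (E4 g (q + 1) - (q + 1)) := by omega
          rw [this, take_succ_drop hq]
          simp [ho]
        · have hW3 : slotW g q [] 0 pvSLOT3 = 0 := by
            simp only [slotW, runW]
            rw [if_neg (fun hc => ho (by simpa [pvSLOT3] using hc.2.2))]
          have hE30 : E1 g q = E4 g q := by rw [hE20, E3, hW3, Nat.add_zero]
          by_cases hi : gAt g q = ['i']
          · have hns : nextSlot (gAt g q) 1 0 = some 4 := by rw [hi]; decide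
            have hrW4 : runW g q pvSLOT4_RUNS 3 = 1 + runW g (q + 1) pvSLOT4_RUNS 2 := by
              show (if q < g.length ∧ gAt g q ∈ pvSLOT4_RUNS then 1 + runW g (q + 1) pvSLOT4_RUNS 2 else 0) = _
              rw [if_pos ⟨hq, by rw [hi]; decide⟩]
            have hW : slotW g q pvSLOT4_RUNS 3 pvSLOT4_SINGLE = runW g q pvSLOT4_RUNS 3 := by
              simp only [slotW]
              rw [if_neg (by rw [hrW4]; omega)]
            have hE : E1 g q = E5 g (q + 1 + runW g (q + 1) pvSLOT4_RUNS 2) := by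
              rw [hE30, E4, hW, hrW4]; ring_nf
            conv_lhs => rw [loopB]
            rw [dif_pos ⟨hq, hch⟩]
            simp only [hns]
            norm_num [hi, runGlyph]
            rw [simR4one g chunks unp [['i']] (q + 1) hch (by simp)]
            rw [hE]
            have hX : q + 1 + runW g (q + 1) pvSLOT4_RUNS 2 ≤ E5 g (q + 1 + runW g (q + 1) pvSLOT4_RUNS 2) := E5_ge g _
            have : E5 g (q + 1 + runW g (q + 1) pvSLOT4_RUNS 2) - q
                 = 1 + (E5 g (q + 1 + runW g (q + 1) pvSLOT4_RUNS 2) - (q + 1)) := by omega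
            rw [this, take_succ_drop hq]
            simp [hi]
          · have hmem4 : ¬ gAt g q ∈ pvSLOT4_RUNS := by simp [pvSLOT4_RUNS, hi]
            have hrW4 : runW g q pvSLOT4_RUNS 3 = 0 := by
              show (if q < g.length ∧ gAt g q ∈ pvSLOT4_RUNS then 1 + runW g (q + 1) pvSLOT4_RUNS 2 else 0) = _
              rw [if_neg (fun hc => hmem4 hc.2)]
            by_cases hd : gAt g q = ['d']
            · have hns : nextSlot (gAt g q) 1 0 = some 4 := by rw [hd]; decide
              have hW : slotW g q pvSLOT4_RUNS 3 pvSLOT4_SINGLE = 1 := by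
                simp only [slotW, hrW4]
                rw [if_pos ⟨trivial, hq, by rw [hd]; decide⟩]
              have hE : E1 g q = E5 g (q + 1) := by rw [hE30, E4, hW]
              conv_lhs => rw [loopB]
              rw [dif_pos ⟨hq, hch⟩]
              simp only [hns]
              norm_num [hd, runGlyph]
              rw [if_neg (by decide : ¬ ('d' = 'i'))]
              rw [simC5 g chunks unp [['d']] (q + 1) hch (by simp)]
              rw [hE]
              have hX : q + 1 ≤ E5 g (q + 1) := E5_ge g _
              have : E5 g (q + 1) - q = 1 + (E5 g (q + 1) - (q + 1)) := by omega
              rw [this, take_succ_drop hq]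
              simp [hd]
            · have hW4 : slotW g q pvSLOT4_RUNS 3 pvSLOT4_SINGLE = 0 := by
                simp only [slotW, hrW4]
                rw [if_neg (fun hc => hd (by simpa [pvSLOT4_SINGLE] using hc.2.2))]
              have hE40 : E1 g q = E5 g q := by rw [hE30, E4, hW4, Nat.add_zero]
              by_cases h5 : gAt g q ∈ pvSLOT5
              · have hns : nextSlot (gAt g q) 1 0 = some 5 := by
                  simp only [nextSlot, slotMatch]
                  norm_num
                  refine ⟨h5, fun j hj1 hj2 => ?_⟩
                  interval_cases j
                  · simpa using h1
                  · simp [he, hqa.1, hqa.2]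
                  · simp [pvSLOT3, ho]
                  · simp [hi, hd]
                have hW5 : slotW g q [] 0 pvSLOT5 = 1 := by
                  simp only [slotW, runW]
                  rw [if_pos ⟨trivial, hq, h5⟩]
                have hE : E1 g q = q + 1 := by rw [hE40, E5, hW5]
                conv_lhs => rw [loopB]
                rw [dif_pos ⟨hq, hch⟩]
                simp only [hns, hE, Nat.add_sub_cancel_left]
                rw [take_succ_drop hq 0]
                simp
              · have hW5 : slotW g q [] 0 pvSLOT5 = 0 := by
                  simp only [slotW, runW]
                  rw [if_neg (fun hc => h5 hc.2.2)]
                have hE : E1 g q = q := by rw [hE40, E5, hW5, Nat.add_zero]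
                omega

lemma simFail (g : List Gly) (chunks : List (List Gly)) (unp : List Gly) (q : Nat)
    (hq : q < g.length) (hch : chunks.length < 6) (hpos : E1 g q = q) :
    loopB g chunks unp [] 1 0 q = loopB g chunks (unp ++ [gAt g q]) [] 1 0 (q + 1) := by
  have hW1 : slotW g q [] 0 pvSLOT1 = 0 := by
    have := E2_ge g (q + slotW g q [] 0 pvSLOT1)
    rw [E1] at hpos
    omega
  have hE2 : E2 g q = q := by rw [E1, hW1, Nat.add_zero] at hpos; exact hpos
  have hW2 : slotW g q pvSLOT2_RUNS 3 pvSLOT2_SINGLE = 0 := by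
    have := E3_ge g (q + slotW g q pvSLOT2_RUNS 3 pvSLOT2_SINGLE)
    rw [E2] at hE2
    omega
  have hE3 : E3 g q = q := by rw [E2, hW2, Nat.add_zero] at hE2; exact hE2
  have hW3 : slotW g q [] 0 pvSLOT3 = 0 := by
    have := E4_ge g (q + slotW g q [] 0 pvSLOT3)
    rw [E3] at hE3
    omega
  have hE4 : E4 g q = q := by rw [E3, hW3, Nat.add_zero] at hE3; exact hE3
  have hW4 : slotW g q pvSLOT4_RUNS 3 pvSLOT4_SINGLE = 0 := by
    have := E5_ge g (q + slotW g q pvSLOT4_RUNS 3 pvSLOT4_SINGLE)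
    rw [E4] at hE4
    omega
  have hE5 : E5 g q = q := by rw [E4, hW4, Nat.add_zero] at hE4; exact hE4
  have hW5 : slotW g q [] 0 pvSLOT5 = 0 := by
    rw [E5] at hE5
    omega
  have h1 : ¬ gAt g q ∈ pvSLOT1 := by
    intro hc
    rw [show slotW g q [] 0 pvSLOT1 = 1 by
      simp only [slotW, runW]; rw [if_pos ⟨trivial, hq, hc⟩]] at hW1
    omega
  have h3 : ¬ gAt g q ∈ pvSLOT3 := by
    intro hc
    rw [show slotW g q [] 0 pvSLOT3 = 1 by
      simp only [slotW, runW]; rw [if_pos ⟨trivial, hq, hc⟩]] at hW3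
    omega
  have h5 : ¬ gAt g q ∈ pvSLOT5 := by
    intro hc
    rw [show slotW g q [] 0 pvSLOT5 = 1 by
      simp only [slotW, runW]; rw [if_pos ⟨trivial, hq, hc⟩]] at hW5
    omega
  have hr2 : ¬ gAt g q ∈ pvSLOT2_RUNS := by
    intro hc
    have : runW g q pvSLOT2_RUNS 3 = 1 + runW g (q + 1) pvSLOT2_RUNS 2 := by
      show (if q < g.length ∧ gAt g q ∈ pvSLOT2_RUNS then 1 + runW g (q + 1) pvSLOT2_RUNS 2 else 0) = _
      rw [if_pos ⟨hq, hc⟩]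
    simp only [slotW, this] at hW2
    rw [if_neg (by omega)] at hW2
    omega
  have hs2 : ¬ gAt g q ∈ pvSLOT2_SINGLE := by
    intro hc
    have hr0 : runW g q pvSLOT2_RUNS 3 = 0 := by
      show (if q < g.length ∧ gAt g q ∈ pvSLOT2_RUNS then 1 + runW g (q + 1) pvSLOT2_RUNS 2 else 0) = _
      rw [if_neg (fun hcc => hr2 hcc.2)]
    simp only [slotW, hr0] at hW2
    rw [if_pos ⟨trivial, hq, hc⟩] at hW2
    omega
  have hr4 : ¬ gAt g q ∈ pvSLOT4_RUNS := by
    intro hc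
    have : runW g q pvSLOT4_RUNS 3 = 1 + runW g (q + 1) pvSLOT4_RUNS 2 := by
      show (if q < g.length ∧ gAt g q ∈ pvSLOT4_RUNS then 1 + runW g (q + 1) pvSLOT4_RUNS 2 else 0) = _
      rw [if_pos ⟨hq, hc⟩]
    simp only [slotW, this] at hW4
    rw [if_neg (by omega)] at hW4
    omega
  have hs4 : ¬ gAt g q ∈ pvSLOT4_SINGLE := by
    intro hc
    have hr0 : runW g q pvSLOT4_RUNS 3 = 0 := by
      show (if q < g.length ∧ gAt g q ∈ pvSLOT4_RUNS then 1 + runW g (q + 1) pvSLOT4_RUNS 2 else 0) = _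
      rw [if_neg (fun hcc => hr4 hcc.2)]
    simp only [slotW, hr0] at hW4
    rw [if_pos ⟨trivial, hq, hc⟩] at hW4
    omega
  have hns : nextSlot (gAt g q) 1 0 = none := by
    simp only [nextSlot, slotMatch]
    norm_num
    intro j hj1 hj2
    interval_cases j
    · simpa using h1
    · intro hc
      rcases (by simpa using hc : gAt g q = ['e'] ∨ gAt g q = ['q'] ∨ gAt g q = ['a']) with h' | h' | h'
      · exact hr2 (by simp [pvSLOT2_RUNS, h'])
      · exact hs2 (by simp [pvSLOT2_SINGLE, h'])
      · exact hs2 (by simp [pvSLOT2_SINGLE, h'])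
    · simpa using h3
    · intro hc
      rcases (by simpa using hc : gAt g q = ['i'] ∨ gAt g q = ['d']) with h' | h'
      · exact hr4 (by simp [pvSLOT4_RUNS, h'])
      · exact hs4 (by simp [pvSLOT4_SINGLE, h'])
    · simpa using h5
  conv_lhs => rw [loopB]
  rw [dif_pos ⟨hq, hch⟩]
  simp only [hns]
  norm_num

lemma main_loop (g : List Gly) : ∀ chunks unp pos,
    post g (loopB g chunks unp [] 1 0 pos) =
      ((loopA g chunks unp pos).1,
       (loopA g chunks unp pos).2.1 ++ g.drop (loopA g chunks unp pos).2.2) := by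
  intro chunks unp pos
  induction chunks, unp, pos using loopA.induct g with
  | case1 chunks unp pos h r hnone ih =>
    have hr : (parse_one_chunkA g pos).1 = none := hnone
    have hE : E1 g pos = pos := by
      by_contra hne
      have hc := chunkA_eq g pos
      rw [hc] at hr
      simp [hne] at hr
    rw [simFail g chunks unp pos h.1 h.2 hE]
    rw [loopA.eq_def, dif_pos h]
    simp only [hr]
    exact ih
  | case2 chunks unp pos h r c hsome ih =>
    have hr : (parse_one_chunkA g pos).1 = some c := hsome
    have hc := chunkA_eq g pos
    have hne : ¬ E1 g pos = pos := by
      intro he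
      rw [hc] at hr
      simp [he] at hr
    have hcc : c = (g.drop pos).take (E1 g pos - pos) := by
      rw [hc] at hr
      simp [hne] at hr
      exact hr.symm
    have h2 : (parse_one_chunkA g pos).2 = E1 g pos := by rw [hc]
    have hgt : E1 g pos > pos := lt_of_le_of_ne (E1_ge g pos) (Ne.symm hne)
    rw [simC1 g chunks unp pos h.1 h.2 hgt]
    rw [loopA.eq_def, dif_pos h]
    simp only [hr]
    rw [h2, ← hcc]
    have ih' := ih
    rw [show r.2 = E1 g pos from h2] at ih'
    exact ih'
  | case3 chunks unp pos h =>
    rw [loopA.eq_def, dif_neg h]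
    conv_lhs => rw [loopB, dif_neg h]
    simp [post]

lemma tailA_eq (g : List Gly) : ∀ pos unparsed, tailA g pos unparsed = unparsed ++ g.drop pos := by
  intro pos unparsed
  induction pos, unparsed using tailA.induct g with
  | case1 pos unparsed h ih =>
    rw [tailA, dif_pos h]
    beta_reduce
    rw [ih, gAt_drop h]
    simp
  | case2 pos unparsed h =>
    rw [tailA, dif_neg h, List.drop_eq_nil_of_le (by omega)]
    simp

-- ===== VERDICT (by name: the statement is the Claim_ definition above) =====
theorem parse_word_into_chunks_spec : Claim_equal_parse_word_into_chunks := by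
  intro word_str _
  unfold Spec_parse_word_into_chunks
  have h := main_loop (evaB (PySem.Chars.lower word_str.toList) 0) [] [] 0
  simp only [post] at h
  rw [Prod.mk.injEq] at h
  obtain ⟨h1, h2⟩ := h
  simp only [parse_word_into_chunks, parse_word_into_chunks_alt, eva_eq, tailA_eq]
  rw [← h1, ← h2]
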